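-- pv_equiv track=rewrite | github.com/mshaaban1400/python-challenge | PyBank/PyBank.py | greatest_increase
-- ===== SOURCE A (Python) =====
-- def greatest_increase(budget_data, budget_date):
--     difference = []
--     for i in range(1, len(budget_data)):
--         difference.append(budget_data[i] - budget_data[i-1])
--     greatest_increase_value = max(difference)
--     greatestp_index = difference.index(greatest_increase_value)+1
--     greatest_increase_month = budget_date[greatestp_index]
--     return greatest_increase_month, greatest_increase_value
-- ===== SOURCE B (Python) =====
-- def greatest_increase(budget_data, budget_date):
--     n = len(budget_data)
--     if n < 2:
--         raise ValueError("need at least two data points")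
--     best_val = budget_data[1] - budget_data[0]
--     best_idx = 1
--     for i in range(2, n):
--         diff = budget_data[i] - budget_data[i - 1]
--         if diff > best_val:
--             best_val = diff
--             best_idx = i
--     return budget_date[best_idx], best_val
-- ===== Notes on version B (the rewrite author's own statement) =====
-- stated objective: simpler
-- what changed: Replaces A's three passes (build a difference list, max() over it, then a .index() rescan) by a single pass that keeps a running best difference and its index, never materializing the difference list; strict > preserves .index's first-occurrence tie-breaking.
import Mathlib
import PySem

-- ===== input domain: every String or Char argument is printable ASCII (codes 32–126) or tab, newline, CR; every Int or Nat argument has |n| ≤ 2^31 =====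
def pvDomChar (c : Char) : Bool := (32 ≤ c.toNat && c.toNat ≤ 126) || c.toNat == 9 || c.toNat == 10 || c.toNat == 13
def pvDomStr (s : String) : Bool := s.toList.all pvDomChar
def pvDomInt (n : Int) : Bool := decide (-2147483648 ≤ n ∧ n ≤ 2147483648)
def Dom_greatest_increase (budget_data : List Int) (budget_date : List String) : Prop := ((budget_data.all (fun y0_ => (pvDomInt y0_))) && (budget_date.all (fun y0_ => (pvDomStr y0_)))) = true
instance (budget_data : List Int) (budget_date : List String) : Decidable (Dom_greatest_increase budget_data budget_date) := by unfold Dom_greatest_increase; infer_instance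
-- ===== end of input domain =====

-- B replaces A's three passes (difference list, max(), .index() rescan) by one running-best pass; RETURN value equivalence is proved on Pre_.

-- ===== PORT A =====
def greatest_increase (budget_data : List Int) (budget_date : List String) : String × Int :=
  let difference : List Int :=
    (PySem.List.pyRange 1 (budget_data.length : Int) 1).foldl
      (fun acc i =>
        acc ++ [(PySem.List.pyGet? budget_data i).getD 0 -
                (PySem.List.pyGet? budget_data (i - 1)).getD 0]) []
  let greatest_increase_value : Int := (PySem.List.max? difference (fun y => y)).getD 0
  let greatestp_index : Int := (((PySem.List.index? difference greatest_increase_value).getD 0 : Nat) : Int) + 1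
  let greatest_increase_month : String := (PySem.List.pyGet? budget_date greatestp_index).getD ""
  (greatest_increase_month, greatest_increase_value)

-- ===== PORT B =====
def greatest_increase_alt (budget_data : List Int) (budget_date : List String) : String × Int :=
  match budget_data with
  | a :: b :: _ =>
    let st : Int × Int :=
      (PySem.List.pyRange 2 (budget_data.length : Int) 1).foldl
        (fun st i =>
          let diff := (PySem.List.pyGet? budget_data i).getD 0 -
                      (PySem.List.pyGet? budget_data (i - 1)).getD 0
          if st.1 < diff then (diff, i) else st)
        (b - a, 1)
    ((PySem.List.pyGet? budget_date st.2).getD "", st.1)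
  | _ => ("", 0)   -- fewer than two data points: Python B raises ValueError (outside Pre_)

-- ===== PRECONDITION & SPEC =====
-- Pre_ is exactly where Python A returns: at least two data points (else max([]) raises ValueError),
-- and the month list is long enough at the first-maximal difference position (else IndexError).
def Pre_greatest_increase (budget_data : List Int) (budget_date : List String) : Prop :=
  2 ≤ budget_data.length ∧
  ∃ j < budget_data.length, 1 ≤ j ∧ j < budget_date.length ∧
    (∀ i < budget_data.length, 1 ≤ i →
      budget_data.getD i 0 - budget_data.getD (i-1) 0 ≤ budget_data.getD j 0 - budget_data.getD (j-1) 0) ∧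
    (∀ i < j, 1 ≤ i →
      budget_data.getD i 0 - budget_data.getD (i-1) 0 < budget_data.getD j 0 - budget_data.getD (j-1) 0)
instance (budget_data : List Int) (budget_date : List String) : Decidable (Pre_greatest_increase budget_data budget_date) := by unfold Pre_greatest_increase; infer_instance

def pvWitness_greatest_increase : List Int × List String := ([1, 5, 3], ["Jan", "Feb", "Mar"])

def Spec_greatest_increase (budget_data : List Int) (budget_date : List String) (out : String × Int) : Prop := out = greatest_increase_alt budget_data budget_date
instance (budget_data : List Int) (budget_date : List String) (out : String × Int) : Decidable (Spec_greatest_increase budget_data budget_date out) := by unfold Spec_greatest_increase; infer_instance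

-- ===== CLAIM (what is proved, stated in full; the proofs are below) =====
def Claim_equal_greatest_increase : Prop := ∀ (budget_data : List Int) (budget_date : List String), Dom_greatest_increase budget_data budget_date → Pre_greatest_increase budget_data budget_date → Spec_greatest_increase budget_data budget_date (greatest_increase budget_data budget_date)

-- ===== LEMMAS AND PROOFS =====

-- one step of the running-best loop abstracted over the diff function d
def pvStep (d : Nat → Int) (st : Int × Int) (k : Nat) : Int × Int :=
  if st.1 < d k then (d k, ((k : Nat) : Int)) else st

-- Invariant of the single pass: its first component is the running max, and its second
-- component is j when nothing beats v, resp. the position of the FIRST maximum otherwise.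
lemma pv_fold_spec (d : Nat → Int) :
    ∀ (cnt s : Nat) (v j : Int),
      ((List.range' s cnt).foldl (pvStep d) (v, j)).1
          = ((List.range' s cnt).map d).foldl max v
      ∧ (((List.range' s cnt).map d).foldl max v ≤ v →
          (List.range' s cnt).foldl (pvStep d) (v, j) = (v, j))
      ∧ (v < ((List.range' s cnt).map d).foldl max v →
          ∃ p, PySem.List.index? ((List.range' s cnt).map d)
                  (((List.range' s cnt).map d).foldl max v) = some p ∧
            (List.range' s cnt).foldl (pvStep d) (v, j)
              = (((List.range' s cnt).map d).foldl max v, ((s + p : Nat) : Int))) := by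
  intro cnt
  induction cnt with
  | zero =>
    intro s v j
    refine ⟨rfl, fun _ => rfl, fun h => absurd h (by simp)⟩
  | succ m ih =>
    intro s v j
    rw [List.range'_succ]
    by_cases hv : v < d s
    · -- the first step updates the state to (d s, s)
      have hstep : pvStep d (v, j) s = (d s, (s : Int)) := by simp [pvStep, hv]
      have hmax : max v (d s) = d s := max_eq_right (le_of_lt hv)
      obtain ⟨ih1, ih2, ih3⟩ := ih (s+1) (d s) (s : Int)
      have hle : d s ≤ ((List.range' (s+1) m).map d).foldl max (d s) :=
        (PySem.List.le_foldl_max _ _).1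
      refine ⟨?_, ?_, ?_⟩
      · simp only [List.foldl_cons, List.map_cons, hstep, hmax, ih1]
      · intro h
        simp only [List.map_cons, List.foldl_cons, hmax] at h
        exact absurd (lt_of_lt_of_le hv (le_trans hle (by exact h))) (lt_irrefl _)
      · intro _
        simp only [List.map_cons, List.foldl_cons, hstep, hmax]
        by_cases hM : ((List.range' (s+1) m).map d).foldl max (d s) ≤ d s
        · have hMe : ((List.range' (s+1) m).map d).foldl max (d s) = d s :=
            le_antisymm hM hle
          refine ⟨0, ?_, ?_⟩
          · rw [hMe, PySem.List.index?_cons_self]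
          · rw [ih2 hM, hMe]; simp
        · rw [not_le] at hM
          obtain ⟨p, hp1, hp2⟩ := ih3 hM
          refine ⟨p + 1, ?_, ?_⟩
          · rw [PySem.List.index?_cons_of_ne _ (ne_of_lt hM), hp1]; rfl
          · rw [hp2]
            refine Prod.ext rfl ?_
            push_cast; ring
    · -- no update: state stays (v, j)
      rw [not_lt] at hv
      have hstep : pvStep d (v, j) s = (v, j) := by simp [pvStep, not_lt.mpr hv]
      have hmax : max v (d s) = v := max_eq_left hv
      obtain ⟨ih1, ih2, ih3⟩ := ih (s+1) v j
      refine ⟨?_, ?_, ?_⟩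
      · simp only [List.foldl_cons, List.map_cons, hstep, hmax, ih1]
      · intro h
        simp only [List.map_cons, List.foldl_cons, hmax] at h
        rw [List.foldl_cons, hstep]
        exact ih2 h
      · intro h
        simp only [List.map_cons, List.foldl_cons, hmax] at h ⊢
        obtain ⟨p, hp1, hp2⟩ := ih3 h
        refine ⟨p + 1, ?_, ?_⟩
        · have hne : d s ≠ ((List.range' (s+1) m).map d).foldl max v :=
            ne_of_lt (lt_of_le_of_lt hv h)
          rw [PySem.List.index?_cons_of_ne _ hne, hp1]; rfl
        · simp only [hstep]
          rw [hp2]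
          refine Prod.ext rfl ?_
          push_cast; ring

-- A's appended difference list is the map of consecutive differences over range' 1 (n-1)
lemma pvA_diff (bd : List Int) :
    (PySem.List.pyRange 1 (bd.length : Int) 1).foldl
      (fun acc i =>
        acc ++ [(PySem.List.pyGet? bd i).getD 0 - (PySem.List.pyGet? bd (i - 1)).getD 0]) []
    = (List.range' 1 (bd.length - 1)).map (fun i => bd.getD i 0 - bd.getD (i - 1) 0) := by
  rw [PySem.List.foldl_append_singleton_eq_map, List.nil_append, PySem.List.pyRange_one]
  have ht : ((bd.length : Int) - 1).toNat = bd.length - 1 := by omega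
  rw [ht, List.map_map, List.range'_eq_map_range, List.map_map]
  apply List.map_congr_left
  intro k _
  simp only [Function.comp]
  have h1 : (1 : Int) + (k : Nat) = ((k + 1 : Nat) : Int) := by push_cast; ring
  have h2 : ((k + 1 : Nat) : Int) - 1 = ((k : Nat) : Int) := by push_cast; ring
  rw [h1, h2, PySem.List.pyGet?_natCast, PySem.List.pyGet?_natCast]
  have h3 : 1 + k = k + 1 := Nat.add_comm 1 k
  rw [h3]
  simp [List.getD_eq_getElem?_getD]

-- B's loop over pyRange 2 n is the pvStep fold over range' 2 (n-2)
lemma pvB_fold (bd : List Int) (init : Int × Int) :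
    (PySem.List.pyRange 2 (bd.length : Int) 1).foldl
      (fun st i =>
        let diff := (PySem.List.pyGet? bd i).getD 0 - (PySem.List.pyGet? bd (i - 1)).getD 0
        if st.1 < diff then (diff, i) else st) init
    = (List.range' 2 (bd.length - 2)).foldl
        (pvStep (fun i => bd.getD i 0 - bd.getD (i - 1) 0)) init := by
  rw [PySem.List.pyRange_one]
  have ht : ((bd.length : Int) - 2).toNat = bd.length - 2 := by omega
  rw [ht, List.foldl_map, List.range'_eq_map_range, List.foldl_map]
  apply PySem.List.foldl_congr_mem
  intro acc k _
  have h1 : (2 : Int) + (k : Nat) = ((2 + k : Nat) : Int) := by push_cast; ring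
  have h2 : ((2 + k : Nat) : Int) - 1 = ((1 + k : Nat) : Int) := by push_cast; ring
  have h3 : 2 + k - 1 = 1 + k := by omega
  simp only [h1, h2, PySem.List.pyGet?_natCast, pvStep, h3, List.getD_eq_getElem?_getD]

-- ===== VERDICT (by name: the statement is the Claim_ definition above) =====
theorem greatest_increase_spec : Claim_equal_greatest_increase := by
  intro bd dt _ hpre
  unfold Spec_greatest_increase
  obtain ⟨hlen, -⟩ := hpre
  match bd with
  | [] => simp at hlen
  | [a] => simp at hlen
  | a :: b :: rest =>
    clear hlen
    simp only [greatest_increase, greatest_increase_alt]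
    rw [pvA_diff, pvB_fold]
    set d : Nat → Int := fun i => (a :: b :: rest).getD i 0 - (a :: b :: rest).getD (i - 1) 0 with hd
    rw [show (a :: b :: rest).length - 2 = rest.length from by simp]
    have hsplit : (List.range' 1 ((a :: b :: rest).length - 1)).map d
        = (b - a) :: (List.range' 2 rest.length).map d := by
      rw [show (a :: b :: rest).length - 1 = rest.length + 1 from by simp,
          List.range'_succ, List.map_cons]
      congr 1
    rw [hsplit, PySem.List.max?_id_cons]
    obtain ⟨h1, h2, h3⟩ := pv_fold_spec d rest.length 2 (b - a) 1
    set lt := (List.range' 2 rest.length).map d with hlt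
    set M := List.foldl max (b - a) lt with hM
    by_cases hcase : M ≤ b - a
    · have hMe : M = b - a := le_antisymm hcase (PySem.List.le_foldl_max _ _).1
      rw [h2 hcase]
      simp only [Option.getD_some]
      rw [hMe, PySem.List.index?_cons_self]
      simp
    · rw [not_le] at hcase
      obtain ⟨p, hp1, hp2⟩ := h3 hcase
      rw [hp2]
      simp only [Option.getD_some]
      rw [PySem.List.index?_cons_of_ne _ (ne_of_lt hcase), hp1]
      refine Prod.ext ?_ rfl
      simp only [Option.map_some, Option.getD_some]
      have : ((2 + p : Nat) : Int) = ((p + 1 : Nat) : Int) + 1 := by push_cast; ring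
      rw [this]
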